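-- pv_equiv track=rewrite | github.com/Thariim/tic-tac-too | main.py | table_preparation_win
-- ===== SOURCE A (Python) =====
-- import copy
--
-- def table_preparation_win(table_dict):
--     '''
--     Function to prepare the table for checking the winning condition.
--     '''
--     rows = list(table_dict.values())[1:]
--     rows = copy.deepcopy(rows)
--     lines = []
--     lines.extend(rows)
--     columns = [[row[i] for row in rows] for i in range(len(rows[0]))]
--     lines.extend(columns)
--     diagonal = [rows[i][i] for i in range(len(rows))]
--     diagonal_rev = [rows[i][len(rows) - 1 - i] for i in range(len(rows))]
--     lines.extend([diagonal, diagonal_rev])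
--     return lines
-- ===== SOURCE B (Python) =====
-- def table_preparation_win(table_dict):
--     '''
--     Recursive-peeling rewrite: columns are obtained by repeatedly taking the
--     heads of the rows and recursing on their tails; the main diagonal by
--     structural recursion that drops one row and shifts the remaining rows
--     left each step; the reverse diagonal by recursion whose index is the
--     length of the remaining suffix minus one.
--     '''
--     rows = [list(row) for row in list(table_dict.values())[1:]]
--
--     def cols_of(rs, k):
--         if k == 0:
--             return []
--         return [[r[0] for r in rs]] + cols_of([r[1:] for r in rs], k - 1)
--
--     def diag(rs):
--         if not rs:
--             return []
--         return [rs[0][0]] + diag([r[1:] for r in rs[1:]])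
--
--     def rdiag(rs):
--         if not rs:
--             return []
--         return [rs[0][len(rs) - 1]] + rdiag(rs[1:])
--
--     return rows + cols_of(rows, len(rows[0])) + [diag(rows), rdiag(rows)]
-- ===== Notes on version B (the rewrite author's own statement) =====
-- stated objective: alternative
-- what changed: Replaces A's three index-based range comprehensions by structural recursion: columns are built by repeatedly peeling the heads of the rows and recursing on their tails, the main diagonal by a recursion that drops a row and left-shifts the rest each step, and the reverse diagonal by a recursion indexed by the shrinking suffix length.
import Mathlib
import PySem

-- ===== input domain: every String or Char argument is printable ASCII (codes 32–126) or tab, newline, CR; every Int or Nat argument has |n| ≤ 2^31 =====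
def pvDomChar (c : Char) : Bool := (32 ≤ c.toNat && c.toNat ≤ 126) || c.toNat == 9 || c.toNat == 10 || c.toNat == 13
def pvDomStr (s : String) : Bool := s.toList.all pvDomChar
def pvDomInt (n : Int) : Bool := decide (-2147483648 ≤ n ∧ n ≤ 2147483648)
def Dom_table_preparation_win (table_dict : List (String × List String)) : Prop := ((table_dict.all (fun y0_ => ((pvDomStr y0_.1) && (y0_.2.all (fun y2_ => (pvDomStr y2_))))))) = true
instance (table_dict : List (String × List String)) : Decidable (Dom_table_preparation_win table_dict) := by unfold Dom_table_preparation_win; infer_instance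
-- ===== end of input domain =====

-- B replaces A's three index-based range comprehensions by structural recursion (head/tail
-- peeling for the columns and both diagonals); objective: alternative.

-- ===== PORT A =====
def table_preparation_win (table_dict : List (String × List String)) : List (List String) :=
  -- rows = list(table_dict.values())[1:]; rows = copy.deepcopy(rows)  (deepcopy is identity here)
  let rows := PySem.List.slice (PySem.Dict.values (PySem.Dict.ofList table_dict)) (some 1) none
  let lines := rows
  -- columns = [[row[i] for row in rows] for i in range(len(rows[0]))]
  let columns := (PySem.List.pyRange 0 ((PySem.List.pyGetD rows 0 []).length : Int) 1).map
      (fun i => rows.map (fun row => PySem.List.pyGetD row i ""))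
  -- diagonal = [rows[i][i] for i in range(len(rows))]
  let diagonal := (PySem.List.pyRange 0 (rows.length : Int) 1).map
      (fun i => PySem.List.pyGetD (PySem.List.pyGetD rows i []) i "")
  -- diagonal_rev = [rows[i][len(rows) - 1 - i] for i in range(len(rows))]
  let diagonal_rev := (PySem.List.pyRange 0 (rows.length : Int) 1).map
      (fun i => PySem.List.pyGetD (PySem.List.pyGetD rows i []) ((rows.length : Int) - 1 - i) "")
  lines ++ columns ++ [diagonal, diagonal_rev]

-- ===== PORT B =====
-- cols_of(rs, k): peel the heads of the rows, recurse on their tails, k times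
def tpwColsOf (rs : List (List String)) : Nat → List (List String)
  | 0 => []
  | k + 1 =>
      (rs.map (fun r => PySem.List.pyGetD r 0 "")) ::
        tpwColsOf (rs.map (fun r => PySem.List.slice r (some 1) none)) k

-- diag(rs): head of the first row, then recurse with the remaining rows shifted left
def tpwDiag : List (List String) → List String
  | [] => []
  | r :: rs =>
      PySem.List.pyGetD r 0 "" ::
        tpwDiag (rs.map (fun q => PySem.List.slice q (some 1) none))
  termination_by rs => rs.length
  decreasing_by simp

-- rdiag(rs): index is the length of the remaining suffix minus one
def tpwRdiag : List (List String) → List String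
  | [] => []
  | r :: rs =>
      PySem.List.pyGetD r (((r :: rs).length : Int) - 1) "" :: tpwRdiag rs

def table_preparation_win_alt (table_dict : List (String × List String)) : List (List String) :=
  -- rows = [list(row) for row in list(table_dict.values())[1:]]  (copying is identity here)
  let rows := PySem.List.slice (PySem.Dict.values (PySem.Dict.ofList table_dict)) (some 1) none
  rows ++ tpwColsOf rows (PySem.List.pyGetD rows 0 []).length ++ [tpwDiag rows, tpwRdiag rows]

-- ===== PRECONDITION & SPEC =====
-- Pre_ excludes exactly the inputs where the Python A raises IndexError: fewer than two dict
-- entries (rows empty), some row shorter than the first row (columns pass), or a row i shorter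
-- than i+1 or than len(rows)-i (diagonal passes).
def Pre_table_preparation_win (table_dict : List (String × List String)) : Prop :=
  let rows := (PySem.Dict.values (PySem.Dict.ofList table_dict)).tail
  rows ≠ [] ∧
  (rows.all (fun r => (rows.headD []).length ≤ r.length) = true) ∧
  (∀ i ∈ List.range rows.length,
     i < (rows.getD i []).length ∧ rows.length - 1 - i < (rows.getD i []).length)
instance (table_dict : List (String × List String)) : Decidable (Pre_table_preparation_win table_dict) := by
  unfold Pre_table_preparation_win; infer_instance

def pvWitness_table_preparation_win : (List (String × List String)) :=
  [("turn", ["1"]), ("r1", ["x", "o"]), ("r2", ["o", "x"])]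

def Spec_table_preparation_win (table_dict : List (String × List String)) (out : List (List String)) : Prop := out = table_preparation_win_alt table_dict
instance (table_dict : List (String × List String)) (out : List (List String)) : Decidable (Spec_table_preparation_win table_dict out) := by unfold Spec_table_preparation_win; infer_instance

-- ===== CLAIM (what is proved, stated in full; the proofs are below) =====
def Claim_equal_table_preparation_win : Prop := ∀ (table_dict : List (String × List String)), Dom_table_preparation_win table_dict → Pre_table_preparation_win table_dict → Spec_table_preparation_win table_dict (table_preparation_win table_dict)

-- ===== LEMMAS AND PROOFS =====

-- r[1:] then index j  =  index j+1
theorem pv_getD_tail (r : List String) (j : Nat) (d : String) :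
    (PySem.List.slice r (some 1) none).getD j d = r.getD (j + 1) d := by
  rw [PySem.List.slice_from_one]
  cases r <;> simp [List.getD]

-- indexing a list of left-shifted rows = shifting after indexing (defaults coincide on [])
theorem pv_getD_map_shift (rs : List (List String)) (i : Nat) :
    (rs.map (fun q => PySem.List.slice q (some 1) none)).getD i [] =
      PySem.List.slice (rs.getD i []) (some 1) none := by
  have h0 : PySem.List.slice ([] : List String) (some 1) none = [] := by
    simp [PySem.List.slice_from_one]
  calc (rs.map (fun q => PySem.List.slice q (some 1) none)).getD i []
      = (rs.map (fun q => PySem.List.slice q (some 1) none)).getD i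
          (PySem.List.slice ([] : List String) (some 1) none) := by rw [h0]
    _ = PySem.List.slice (rs.getD i []) (some 1) none :=
        List.getD_map (n := i) rs ([] : List String) _

-- B's column peeling computes A's indexed columns
theorem pv_colsOf_eq (k : Nat) (rs : List (List String)) :
    tpwColsOf rs k = (List.range k).map (fun j => rs.map (fun r => r.getD j "")) := by
  induction k generalizing rs with
  | zero => rfl
  | succ k ih =>
      rw [tpwColsOf, ih, List.range_succ_eq_map]
      simp only [List.map_cons, List.map_map, Function.comp_def, Nat.succ_eq_add_one]
      refine congrArg₂ List.cons ?_ ?_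
      · simp [PySem.List.pyGetD_zero]
      · refine List.map_congr_left (fun j _ => ?_)
        refine List.map_congr_left (fun r _ => ?_)
        exact pv_getD_tail r j ""

-- B's diagonal recursion computes A's indexed diagonal
theorem pv_diag_eq (rs : List (List String)) :
    tpwDiag rs = (List.range rs.length).map (fun i => (rs.getD i []).getD i "") := by
  induction hn : rs.length using Nat.strong_induction_on generalizing rs with
  | _ n ih =>
  subst hn
  cases rs with
  | nil => simp [tpwDiag]
  | cons r rs =>
      have ih' := ih rs.length (by simp)
        (rs.map (fun q => PySem.List.slice q (some 1) none)) (by simp)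
      rw [tpwDiag, ih']
      simp only [List.length_cons, List.range_succ_eq_map, List.map_cons,
        List.map_map, Function.comp_def, Nat.succ_eq_add_one]
      refine congrArg₂ List.cons ?_ ?_
      · simp [PySem.List.pyGetD_zero]
      · refine List.map_congr_left (fun i _ => ?_)
        rw [pv_getD_map_shift, pv_getD_tail]
        simp

-- B's reverse-diagonal recursion computes A's indexed reverse diagonal
theorem pv_rdiag_eq (rs : List (List String)) :
    tpwRdiag rs =
      (List.range rs.length).map
        (fun i => (rs.getD i []).getD (rs.length - 1 - i) "") := by
  induction rs with
  | nil => simp [tpwRdiag]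
  | cons r rs ih =>
      rw [tpwRdiag, ih]
      simp only [List.length_cons, List.range_succ_eq_map, List.map_cons,
        List.map_map, Function.comp_def, Nat.succ_eq_add_one]
      refine congrArg₂ List.cons ?_ ?_
      · have h1 : ((rs.length + 1 : Nat) : Int) - 1 = ((rs.length : Nat) : Int) := by
          push_cast; ring
        rw [h1, PySem.List.pyGetD_natCast]
        simp
      · refine List.map_congr_left (fun i _ => ?_)
        simp only [List.getD_cons_succ]
        rw [show rs.length + 1 - 1 - (i + 1) = rs.length - 1 - i from by omega]

-- ===== VERDICT (by name: the statement is the Claim_ definition above) =====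
theorem table_preparation_win_spec : Claim_equal_table_preparation_win := by
  intro td _ _
  unfold Spec_table_preparation_win table_preparation_win table_preparation_win_alt
  dsimp only
  set rows := PySem.List.slice (PySem.Dict.values (PySem.Dict.ofList td)) (some 1) none with hrows
  refine congrArg₂ _ (congrArg₂ _ rfl ?_) (congrArg₂ _ ?_ (congrArg₂ _ ?_ rfl))
  · rw [pv_colsOf_eq, PySem.List.pyRange_zero_nat, List.map_map]
    refine List.map_congr_left (fun j _ => ?_)
    simp [PySem.List.pyGetD_natCast]
  · rw [pv_diag_eq, PySem.List.pyRange_zero_nat, List.map_map]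
    refine List.map_congr_left (fun j _ => ?_)
    simp [PySem.List.pyGetD_natCast]
  · rw [pv_rdiag_eq, PySem.List.pyRange_zero_nat, List.map_map]
    refine List.map_congr_left (fun j hj => ?_)
    simp only [List.mem_range] at hj
    have h1 : ((rows.length : Int) - 1 - (j : Nat)) = ((rows.length - 1 - j : Nat) : Int) := by
      omega
    simp [h1, PySem.List.pyGetD_natCast]
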